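-- pv_equiv track=rewrite | github.com/dudamarlena/pyc_source | pycfiles/pyni-0.0.8.tar/ruleparser.cpython-34.py | regex_string_from_list
-- ===== SOURCE A (Python) =====
-- def regex_string_from_list(input_list, token):
--     if not input_list:
--         return token
--     if token:
--         text_list = [
--          '{} '.format(token)]
--         for ele in input_list:
--             text_list.append('|{} '.format(ele))
--
--     else:
--         text_list = []
--         for i, ele in enumerate(input_list):
--             text_list.append('{} '.format(ele))
--             if i != len(input_list) - 1:
--                 text_list[(-1)] += '|'
--                 continue
--
--     return '({})'.format(''.join(text_list))
-- ===== SOURCE B (Python) =====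
-- def _regex_body(parts):
--     # divide and conquer: body of the whole list = body of each half joined by '|'
--     if len(parts) == 1:
--         return '{} '.format(parts[0])
--     mid = len(parts) // 2
--     return _regex_body(parts[:mid]) + '|' + _regex_body(parts[mid:])
--
--
-- def regex_string_from_list(input_list, token):
--     if not input_list:
--         return token
--     parts = ([token] if token else []) + list(input_list)
--     return '({})'.format(_regex_body(parts))
-- ===== Notes on version B (the rewrite author's own statement) =====
-- stated objective: alternative
-- what changed: Replaces A's two differently-shaped left-to-right accumulator loops (token-prefixed '|x ' pieces vs an enumerate loop that mutates the last piece) by divide and conquer on one unified parts list: the body of a list is the body of its left half, '|', and the body of its right half, with 'e ' as the base case.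
import Mathlib
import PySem

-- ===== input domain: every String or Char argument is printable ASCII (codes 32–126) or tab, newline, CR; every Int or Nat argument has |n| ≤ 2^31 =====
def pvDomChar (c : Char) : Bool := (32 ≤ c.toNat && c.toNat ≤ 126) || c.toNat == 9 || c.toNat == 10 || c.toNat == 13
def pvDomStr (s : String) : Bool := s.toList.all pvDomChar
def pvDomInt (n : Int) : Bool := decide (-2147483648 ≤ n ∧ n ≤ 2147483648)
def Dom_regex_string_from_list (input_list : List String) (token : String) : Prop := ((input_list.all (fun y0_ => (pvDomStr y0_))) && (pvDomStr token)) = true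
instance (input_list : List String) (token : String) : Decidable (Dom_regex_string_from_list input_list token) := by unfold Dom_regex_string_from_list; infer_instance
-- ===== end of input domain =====

-- B replaces A's two accumulator loops by divide and conquer over one unified parts list (objective: alternative).

-- ===== PORT A =====
-- text_list[-1] += s  (acc is nonempty at every use site)
def pyLastConcat (acc : List String) (s : String) : List String :=
  acc.dropLast ++ [acc.getLastD "" ++ s]

def regex_string_from_list (input_list : List String) (token : String) : String :=
  if input_list = [] then token
  else
    let text_list :=
      if token ≠ "" then
        input_list.foldl (fun acc ele => acc ++ ["|" ++ ele ++ " "]) [token ++ " "]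
      else
        (PySem.List.enumerate input_list).foldl
          (fun acc p =>
            let acc := acc ++ [p.2 ++ " "]
            if p.1 ≠ (input_list.length : Int) - 1 then pyLastConcat acc "|" else acc) []
    "(" ++ PySem.Str.join "" text_list ++ ")"

-- ===== PORT B =====
-- _regex_body; parts[:mid]/parts[mid:] with 0 ≤ mid ≤ len are exactly take/drop.
-- The [] case (base branch via length ≤ 1) is unreachable in B: callers always pass a
-- nonempty parts list (Python _regex_body([]) would recurse forever).
def regexBody (parts : List String) : String :=
  if _ : parts.length ≤ 1 then parts.headD "" ++ " "
  else
    let mid := parts.length / 2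
    regexBody (parts.take mid) ++ "|" ++ regexBody (parts.drop mid)
termination_by parts.length
decreasing_by
  · simp [List.length_take]; omega
  · simp [List.length_drop]; omega

def regex_string_from_list_alt (input_list : List String) (token : String) : String :=
  if input_list = [] then token
  else
    let parts := (if token ≠ "" then [token] else []) ++ input_list
    "(" ++ regexBody parts ++ ")"

-- ===== PRECONDITION & SPEC =====
def Spec_regex_string_from_list (input_list : List String) (token : String) (out : String) : Prop := out = regex_string_from_list_alt input_list token
instance (input_list : List String) (token : String) (out : String) : Decidable (Spec_regex_string_from_list input_list token out) := by unfold Spec_regex_string_from_list; infer_instance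

-- ===== CLAIM (what is proved, stated in full; the proofs are below) =====
def Claim_equal_regex_string_from_list : Prop := ∀ (input_list : List String) (token : String), Dom_regex_string_from_list input_list token → Spec_regex_string_from_list input_list token (regex_string_from_list input_list token)

-- ===== LEMMAS AND PROOFS =====

-- join sep pulls a head character out of its first part
theorem join_cons_head (sep : List Char) (c : Char) (x : List Char) (l : List (List Char)) :
    PySem.Chars.join sep ((c :: x) :: l) = c :: PySem.Chars.join sep (x :: l) := by
  cases l with
  | nil => simp [PySem.Chars.join_singleton]
  | cons y t => simp [PySem.Chars.join_cons_cons]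

-- ''-join of a head piece and a tail of pieces is plain concatenation
theorem join_nil_cons (x : List Char) (l : List (List Char)) :
    PySem.Chars.join [] (x :: l) = x ++ PySem.Chars.join [] l := by
  cases l with
  | nil => simp [PySem.Chars.join_singleton, PySem.Chars.join_nil]
  | cons y t => simp [PySem.Chars.join_cons_cons]

-- join over a concatenation of two nonempty piece lists splits with one separator between
theorem join_append (sep : List Char) (a b : List (List Char)) (ha : a ≠ []) (hb : b ≠ []) :
    PySem.Chars.join sep (a ++ b) =
      PySem.Chars.join sep a ++ sep ++ PySem.Chars.join sep b := by
  induction a with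
  | nil => exact absurd rfl ha
  | cons x a ih =>
    cases a with
    | nil =>
      cases b with
      | nil => exact absurd rfl hb
      | cons y t => simp [PySem.Chars.join_cons_cons, PySem.Chars.join_singleton]
    | cons x2 a2 =>
      have h := ih (by simp)
      simp only [List.cons_append, PySem.Chars.join_cons_cons] at *
      rw [h]
      simp [List.append_assoc]

-- B's divide-and-conquer computes the ' |'-join of the parts plus a trailing space
theorem regexBody_toList (l : List String) (h : l ≠ []) :
    (regexBody l).toList = PySem.Chars.join [' ', '|'] (l.map String.toList) ++ [' '] := by
  fun_induction regexBody l with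
  | case1 parts h1 =>
    match parts, h with
    | [e], _ => simp [PySem.Chars.join_singleton]
    | e :: e2 :: t, _ => simp at h1
  | case2 parts h1 mid ih1 ih2 =>
    have hta : parts.take mid ≠ [] := by
      intro hc
      have := congrArg List.length hc
      simp only [List.length_take, List.length_nil] at this
      omega
    have htb : parts.drop mid ≠ [] := by
      intro hc
      have := congrArg List.length hc
      simp only [List.length_drop, List.length_nil] at this
      omega
    rw [String.toList_append, String.toList_append, ih1 hta, ih2 htb]
    have hsplit : parts.map String.toList =
        (parts.take mid).map String.toList ++ (parts.drop mid).map String.toList := by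
      rw [← List.map_append, List.take_append_drop]
    rw [hsplit, join_append _ _ _ (by simpa using hta) (by simpa using htb)]
    simp [List.append_assoc]

-- token branch: ''-join of 't ' followed by the '|e ' pieces = ' |'-join of (t :: l) plus a space
theorem join_token_branch (t : List Char) (l : List String) :
    PySem.Chars.join [] ((t ++ [' ']) :: l.map (fun e => '|' :: (e.toList ++ [' ']))) =
      PySem.Chars.join [' ', '|'] (t :: l.map String.toList) ++ [' '] := by
  induction l generalizing t with
  | nil => simp [PySem.Chars.join_singleton]
  | cons e l ih =>
    have h := ih ('|' :: e.toList)
    rw [join_cons_head] at h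
    simp only [List.cons_append] at h
    simp only [List.map_cons, PySem.Chars.join_cons_cons, List.append_nil]
    rw [h]
    simp [List.append_assoc]

-- no-token branch: ''-join of the enumerate-built pieces = ' |'-join of the list plus a space
theorem join_enum_branch (n : Nat) (l : List String) (s : Nat) (hne : l ≠ [])
    (hs : s + l.length = n) :
    PySem.Chars.join []
      ((PySem.List.enumerate l (s : Int)).map
        (fun p => if p.1 ≠ (n : Int) - 1 then p.2.toList ++ [' ', '|'] else p.2.toList ++ [' '])) =
      PySem.Chars.join [' ', '|'] (l.map String.toList) ++ [' '] := by
  induction l generalizing s with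
  | nil => exact absurd rfl hne
  | cons e l ih =>
    cases l with
    | nil =>
      have hlast : ¬ ((s : Int) ≠ (n : Int) - 1) := by
        simp only [List.length_cons, List.length_nil] at hs; omega
      simp [PySem.List.enumerate_cons, PySem.List.enumerate_nil, hlast,
        PySem.Chars.join_singleton]
    | cons e2 l2 =>
      have hne' : (s : Int) ≠ (n : Int) - 1 := by
        simp only [List.length_cons] at hs; omega
      have h := ih (s := s + 1) (by simp) (by simp only [List.length_cons] at hs ⊢; omega)
      push_cast at h
      simp only [PySem.List.enumerate_cons, List.map_cons]
      rw [join_nil_cons, if_pos hne', join_nil_cons]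
      simp only [PySem.List.enumerate_cons, List.map_cons] at h
      rw [join_nil_cons] at h
      rw [h, PySem.Chars.join_cons_cons]
      simp [List.append_assoc]

-- text_list[-1] += s on a just-extended nonempty list
theorem pyLastConcat_concat (acc : List String) (x s : String) :
    pyLastConcat (acc ++ [x]) s = acc ++ [x ++ s] := by
  simp [pyLastConcat]

theorem regex_main : ∀ (input_list : List String) (token : String),
    regex_string_from_list input_list token = regex_string_from_list_alt input_list token := by
  intro l t
  unfold regex_string_from_list regex_string_from_list_alt
  by_cases hl : l = []
  · simp [hl]
  · simp only [if_neg hl]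
    by_cases ht : t = ""
    · -- no-token branch
      simp only [ht, ne_eq, not_true_eq_false, if_false, List.nil_append]
      have hstep :
          (fun (acc : List String) (p : Int × String) =>
              let acc := acc ++ [p.2 ++ " "]
              if p.1 ≠ (l.length : Int) - 1 then pyLastConcat acc "|" else acc) =
            (fun acc p =>
              acc ++ [if p.1 ≠ (l.length : Int) - 1 then p.2 ++ " " ++ "|" else p.2 ++ " "]) := by
        funext acc p
        by_cases hc : p.1 = (l.length : Int) - 1 <;> simp [hc, pyLastConcat_concat]
      rw [hstep, PySem.List.foldl_append_singleton_eq_map]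
      apply String.toList_inj.mp
      simp only [String.toList_append, PySem.Str.toList_join]
      have hmap : List.map String.toList
            (List.map (fun p : Int × String =>
              if p.1 ≠ (l.length : Int) - 1 then p.2 ++ " " ++ "|" else p.2 ++ " ")
              (PySem.List.enumerate l (0 : Int))) =
          List.map (fun p : Int × String =>
              if p.1 ≠ (l.length : Int) - 1 then p.2.toList ++ [' ', '|'] else p.2.toList ++ [' '])
            (PySem.List.enumerate l (0 : Int)) := by
        simp only [List.map_map]
        refine List.map_congr_left ?_
        intro p _
        by_cases hc : p.1 = (l.length : Int) - 1 <;> simp [hc]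
      have hj := join_enum_branch l.length l 0 hl (by simp)
      simp only [Nat.cast_zero] at hj
      simp only [List.nil_append]
      rw [hmap, show ("" : String).toList = [] from rfl, hj, regexBody_toList l hl]
    · -- token branch
      simp only [ne_eq, ht, not_false_eq_true, if_true, PySem.List.foldl_append_singleton_eq_map]
      apply String.toList_inj.mp
      simp only [String.toList_append, PySem.Str.toList_join]
      have hmap : List.map String.toList ([t ++ " "] ++ List.map (fun x => "|" ++ x ++ " ") l) =
          (t.toList ++ [' ']) :: l.map (fun e => '|' :: (e.toList ++ [' '])) := by
        simp [List.map_map, Function.comp_def]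
      rw [hmap, show ("" : String).toList = [] from rfl, join_token_branch,
        List.singleton_append, regexBody_toList (t :: l) (by simp)]
      simp

-- ===== VERDICT (by name: the statement is the Claim_ definition above) =====
theorem regex_string_from_list_spec : Claim_equal_regex_string_from_list := by
  intro l t _
  unfold Spec_regex_string_from_list
  exact regex_main l t
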